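-- pv_equiv track=rewrite | github.com/Hulyamr13/Python_Advanced_may_2023 | Python Advanced  Exams/Pawn Wars.py | check_if_can_capture
-- ===== SOURCE A (Python) =====
-- def check_if_can_capture(coordinates_attacker, coordinates_defender):
--     row_a = coordinates_attacker[0]
--     col_a = coordinates_attacker[1]
--     row_d = coordinates_defender[0]
--     col_d = coordinates_defender[1]
--     captures = [[row_a - 1, col_a - 1], [row_a - 1, col_a + 1], [row_a + 1, col_a - 1], [row_a + 1, col_a + 1]]
--     capture_on = [capture for capture in captures if capture[0] == row_d and capture[1] == col_d]
--     if capture_on: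
--         return capture_on[0]
-- ===== SOURCE B (Python) =====
-- def check_if_can_capture(coordinates_attacker, coordinates_defender):
--     row_a = coordinates_attacker[0]
--     col_a = coordinates_attacker[1]
--     row_d = coordinates_defender[0]
--     col_d = coordinates_defender[1]
--     if abs(row_d - row_a) == 1 and abs(col_d - col_a) == 1:
--         return [row_d, col_d]
-- ===== Notes on version B (the rewrite author's own statement) =====
-- stated objective: simpler
-- what changed: Replaces the build-four-candidates-then-filter scan with a single closed-form diagonal-adjacency test (abs differences both 1) returning [row_d, col_d] directly.
import Mathlib
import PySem

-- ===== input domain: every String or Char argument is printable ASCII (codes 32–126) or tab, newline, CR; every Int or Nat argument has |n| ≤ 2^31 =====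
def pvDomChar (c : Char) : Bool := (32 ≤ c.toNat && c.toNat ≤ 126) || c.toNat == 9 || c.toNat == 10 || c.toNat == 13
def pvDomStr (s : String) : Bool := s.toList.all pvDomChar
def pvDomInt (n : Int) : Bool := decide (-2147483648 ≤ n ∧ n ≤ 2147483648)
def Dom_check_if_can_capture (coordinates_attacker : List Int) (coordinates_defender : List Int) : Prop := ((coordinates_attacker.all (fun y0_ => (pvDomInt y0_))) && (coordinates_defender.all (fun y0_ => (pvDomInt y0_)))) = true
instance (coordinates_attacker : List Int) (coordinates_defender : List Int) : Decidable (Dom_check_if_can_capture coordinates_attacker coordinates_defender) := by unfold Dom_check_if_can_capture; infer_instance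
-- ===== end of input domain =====

-- B replaces A's enumerate-four-diagonals-and-filter scan by a closed-form
-- diagonal-adjacency test (objective: simpler); return values agree on Pre_.

-- ===== PORT A =====
def check_if_can_capture (coordinates_attacker : List Int) (coordinates_defender : List Int) : Option (List Int) :=
  match PySem.List.pyGet? coordinates_attacker 0, PySem.List.pyGet? coordinates_attacker 1,
        PySem.List.pyGet? coordinates_defender 0, PySem.List.pyGet? coordinates_defender 1 with
  | some row_a, some col_a, some row_d, some col_d =>
    let captures : List (List Int) :=
      [[row_a - 1, col_a - 1], [row_a - 1, col_a + 1], [row_a + 1, col_a - 1], [row_a + 1, col_a + 1]]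
    let capture_on := captures.filter
      (fun capture => PySem.List.pyGet? capture 0 == some row_d && PySem.List.pyGet? capture 1 == some col_d)
    match capture_on with
    | x :: _ => some x
    | [] => none
  | _, _, _, _ => none  -- Python raises IndexError here; excluded by Pre_

-- ===== PORT B =====
def check_if_can_capture_alt (coordinates_attacker : List Int) (coordinates_defender : List Int) : Option (List Int) :=
  -- sequential indexing, as in Source B; a failed index is Python's IndexError, excluded by Pre_
  (PySem.List.pyGet? coordinates_attacker 0).bind fun row_a =>
  (PySem.List.pyGet? coordinates_attacker 1).bind fun col_a =>
  (PySem.List.pyGet? coordinates_defender 0).bind fun row_d =>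
  (PySem.List.pyGet? coordinates_defender 1).bind fun col_d =>
  if (row_d - row_a).natAbs = 1 ∧ (col_d - col_a).natAbs = 1 then some [row_d, col_d] else none

-- ===== PRECONDITION & SPEC =====
-- Pre_ excludes exactly the inputs where Python's A raises IndexError (a list shorter than 2).
def Pre_check_if_can_capture (coordinates_attacker : List Int) (coordinates_defender : List Int) : Prop :=
  2 ≤ coordinates_attacker.length ∧ 2 ≤ coordinates_defender.length
instance (coordinates_attacker : List Int) (coordinates_defender : List Int) : Decidable (Pre_check_if_can_capture coordinates_attacker coordinates_defender) := by unfold Pre_check_if_can_capture; infer_instance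
def pvWitness_check_if_can_capture : List Int × List Int := ([3, 4], [2, 5])
def Spec_check_if_can_capture (coordinates_attacker : List Int) (coordinates_defender : List Int) (out : Option (List Int)) : Prop := out = check_if_can_capture_alt coordinates_attacker coordinates_defender
instance (coordinates_attacker : List Int) (coordinates_defender : List Int) (out : Option (List Int)) : Decidable (Spec_check_if_can_capture coordinates_attacker coordinates_defender out) := by unfold Spec_check_if_can_capture; infer_instance

-- ===== CLAIM (what is proved, stated in full; the proofs are below) =====
def Claim_equal_check_if_can_capture : Prop := ∀ (coordinates_attacker : List Int) (coordinates_defender : List Int), Dom_check_if_can_capture coordinates_attacker coordinates_defender → Pre_check_if_can_capture coordinates_attacker coordinates_defender → Spec_check_if_can_capture coordinates_attacker coordinates_defender (check_if_can_capture coordinates_attacker coordinates_defender)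

-- ===== LEMMAS AND PROOFS =====
theorem pyGet2 (x y : Int) (a : List Int) :
    PySem.List.pyGet? (x :: y :: a) 0 = some x ∧ PySem.List.pyGet? (x :: y :: a) 1 = some y := by
  constructor
  · exact PySem.List.pyGet?_zero_cons ..
  · have h : (1 : Int) = ((1 : Nat) : Int) := rfl
    rw [h, PySem.List.pyGet?_natCast]; rfl

theorem core_eq (ra ca rd cd : Int) (ta td : List Int) :
    check_if_can_capture (ra :: ca :: ta) (rd :: cd :: td) =
    check_if_can_capture_alt (ra :: ca :: ta) (rd :: cd :: td) := by
  simp only [check_if_can_capture, check_if_can_capture_alt, (pyGet2 _ _ _).1, (pyGet2 _ _ _).2,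
    Option.bind_some, List.filter_cons, List.filter_nil]
  split_ifs <;> simp_all <;> omega

-- ===== VERDICT (by name: the statement is the Claim_ definition above) =====
theorem check_if_can_capture_spec : Claim_equal_check_if_can_capture := by
  intro a d _ hpre
  obtain ⟨ha, hd⟩ := hpre
  match a, d with
  | x :: y :: a', z :: w :: d' => exact core_eq x y z w a' d'
  | [], _ => simp at ha
  | [_], _ => simp at ha
  | _ :: _ :: _, [] => simp at hd
  | _ :: _ :: _, [_] => simp at hd
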